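-- pv_equiv track=rewrite | github.com/ebleb/JosephsonCircuitsGui | logic/x_mode_selection.py | nested_hb_top_block_occurrences
-- ===== SOURCE A (Python) =====
-- def nested_hb_top_block_occurrences(occurrences):
--     nested = []
--     paths = [
--         tuple(item.get("instance_path", []) or [])
--         for item in occurrences
--     ]
--     for item, path in zip(occurrences, paths):
--         for other in paths:
--             if other == path:
--                 continue
--             if len(other) < len(path) and path[:len(other)] == other:
--                 nested.append(item)
--                 break
--     return nested
-- ===== SOURCE B (Python) =====
-- def nested_hb_top_block_occurrences(occurrences):
--     paths = [
--         tuple(item.get("instance_path", []) or [])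
--         for item in occurrences
--     ]
--     path_set = set(paths)
--     return [
--         item
--         for item, path in zip(occurrences, paths)
--         if any(path[:k] in path_set for k in range(len(path)))
--     ]
-- ===== Notes on version B (the rewrite author's own statement) =====
-- stated objective: alternative
-- what changed: Instead of comparing each path pairwise against every other path (O(n^2*L)), B builds a set of all paths once and, for each item, checks whether any proper prefix of its own path is in that set (O(n*L^2) with hashing).
import Mathlib
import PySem

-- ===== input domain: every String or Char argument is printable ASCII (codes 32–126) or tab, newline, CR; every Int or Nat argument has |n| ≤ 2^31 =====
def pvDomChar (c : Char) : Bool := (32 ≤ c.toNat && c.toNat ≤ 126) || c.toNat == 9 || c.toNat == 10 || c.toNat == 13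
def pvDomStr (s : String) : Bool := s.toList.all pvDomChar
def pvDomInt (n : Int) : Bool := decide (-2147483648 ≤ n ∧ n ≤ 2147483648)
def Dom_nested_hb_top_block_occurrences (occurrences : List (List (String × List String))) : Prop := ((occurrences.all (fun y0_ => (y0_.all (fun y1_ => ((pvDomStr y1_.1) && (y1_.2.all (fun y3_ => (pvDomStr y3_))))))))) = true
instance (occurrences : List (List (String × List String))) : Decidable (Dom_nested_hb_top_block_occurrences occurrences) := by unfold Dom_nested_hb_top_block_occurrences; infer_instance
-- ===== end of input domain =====

-- B replaces A's pairwise all-paths scan by one set of paths plus a proper-prefix membership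
-- check per item: an alternative decomposition of the same cost class, not claimed faster.

-- ===== PORT A =====
-- tuple(item.get("instance_path", []) or [])  (shared normalization helper of both Pythons)
def pvGetPath (item : List (String × List String)) : List String :=
  let v := PySem.Dict.getD (PySem.Dict.mk item) "instance_path" []
  if v.isEmpty then [] else v

def nested_hb_top_block_occurrences (occurrences : List (List (String × List String))) : List (List (String × List String)) :=
  let paths := occurrences.map pvGetPath
  (occurrences.zip paths).foldl
    (fun nested ip =>
      if paths.any (fun other =>
          if other == ip.2 then false
          else decide (other.length < ip.2.length) && (ip.2.take other.length == other))
      then nested ++ [ip.1] else nested) []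

-- ===== PORT B =====
def nested_hb_top_block_occurrences_alt (occurrences : List (List (String × List String))) : List (List (String × List String)) :=
  let paths := occurrences.map pvGetPath
  let pathSet : PySem.Set (List String) := PySem.Set.ofList paths
  ((occurrences.zip paths).filter
      (fun ip => (List.range ip.2.length).any (fun k => PySem.Set.contains pathSet (ip.2.take k)))).map
    (fun ip => ip.1)

-- ===== PRECONDITION & SPEC =====
def Spec_nested_hb_top_block_occurrences (occurrences : List (List (String × List String))) (out : List (List (String × List String))) : Prop := out = nested_hb_top_block_occurrences_alt occurrences
instance (occurrences : List (List (String × List String))) (out : List (List (String × List String))) : Decidable (Spec_nested_hb_top_block_occurrences occurrences out) := by unfold Spec_nested_hb_top_block_occurrences; infer_instance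

-- ===== CLAIM (what is proved, stated in full; the proofs are below) =====
def Claim_equal_nested_hb_top_block_occurrences : Prop := ∀ (occurrences : List (List (String × List String))), Dom_nested_hb_top_block_occurrences occurrences → Spec_nested_hb_top_block_occurrences occurrences (nested_hb_top_block_occurrences occurrences)

-- ===== LEMMAS AND PROOFS =====

-- The two per-item tests agree: "some other path is a strict proper prefix of p"
-- equals "some proper prefix of p is in the set of all paths".
theorem pv_pred_eq (p : List String) (paths : List (List String)) :
    (paths.any (fun other =>
        if other == p then false
        else decide (other.length < p.length) && (p.take other.length == other)))
    = ((List.range p.length).any (fun k =>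
        PySem.Set.contains (PySem.Set.ofList paths) (p.take k))) := by
  apply Bool.eq_iff_iff.mpr
  simp only [List.any_eq_true, List.mem_range, PySem.Set.contains_iff, PySem.Set.mem_ofList]
  constructor
  · rintro ⟨q, hq, h⟩
    by_cases hqp : q == p
    · simp [hqp] at h
    · simp only [hqp, Bool.false_eq_true, if_false, Bool.and_eq_true, decide_eq_true_eq,
        beq_iff_eq] at h
      exact ⟨q.length, h.1, by rw [h.2]; exact hq⟩
  · rintro ⟨k, hk, hmem⟩
    refine ⟨p.take k, hmem, ?_⟩
    have hlen : (p.take k).length = k := List.length_take_of_le (Nat.le_of_lt hk)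
    have hne : (p.take k == p) = false := by
      apply beq_eq_false_iff_ne.mpr
      intro h
      have := congrArg List.length h
      omega
    simp only [hne, Bool.false_eq_true, if_false, Bool.and_eq_true, decide_eq_true_eq, beq_iff_eq,
      hlen]
    exact ⟨hk, trivial⟩

-- ===== VERDICT (by name: the statement is the Claim_ definition above) =====
theorem nested_hb_top_block_occurrences_spec : Claim_equal_nested_hb_top_block_occurrences := by
  intro occurrences _
  unfold Spec_nested_hb_top_block_occurrences
  unfold nested_hb_top_block_occurrences nested_hb_top_block_occurrences_alt
  simp only []
  rw [PySem.List.foldl_append_if]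
  simp only [List.nil_append]
  rw [List.filter_congr (l := occurrences.zip (occurrences.map pvGetPath))
        (fun ip _ => pv_pred_eq ip.2 (occurrences.map pvGetPath))]
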